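-- pv_equiv track=rewrite | github.com/Joseph-Chou911/fred-cache | scripts/render_snapshot_dashboard.py | classify_notes_tag
-- ===== SOURCE A (Python) =====
-- def classify_notes_tag(notes: str) -> str:
--     # Prefer leading severity prefix
--     if notes.startswith("ERROR:"):
--         return "ERROR"
--     if notes.startswith("WARN:"):
--         # try to extract short tag after WARN:
--         rest = notes[len("WARN:"):].strip()
--         # cut at ';' or '(' if present
--         for sep in (";", "("):
--             if sep in rest:
--                 rest = rest.split(sep, 1)[0].strip()
--         return rest or "WARN"
--     if notes.startswith("INFO:"):
--         rest = notes[len("INFO:"):].strip()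
--         for sep in (";", "("):
--             if sep in rest:
--                 rest = rest.split(sep, 1)[0].strip()
--         return rest or "INFO"
--
--     # fallback tags for common patterns
--     low = notes.lower()
--     if "derived" in low:
--         return "DERIVED"
--     if "nonofficial" in low:
--         return "NONOFFICIAL"
--     if "no_key" in low:
--         return "NO_KEY"
--     return "NA"
-- ===== SOURCE B (Python) =====
-- def classify_notes_tag(notes: str) -> str:
--     # table-driven: prefixes in priority order; None default = bare ERROR tag
--     for prefix, default in (("ERROR:", None), ("WARN:", "WARN"), ("INFO:", "INFO")):
--         if notes.startswith(prefix):
--             if default is None: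
--                 return "ERROR"
--             rest = notes[len(prefix):].strip()
--             cut = []
--             for c in rest:
--                 if c in ";(":
--                     break
--                 cut.append(c)
--             rest = "".join(cut).strip()
--             return rest or default
--     low = notes.lower()
--     for pat, tag in (("derived", "DERIVED"), ("nonofficial", "NONOFFICIAL"), ("no_key", "NO_KEY")):
--         if pat in low:
--             return tag
--     return "NA"
-- ===== Notes on version B (the rewrite author's own statement) =====
-- stated objective: alternative
-- what changed: Replaced A's duplicated WARN/INFO if-chains and two sequential split-and-strip passes by two priority tables (prefix table and fallback-pattern table) iterated in order, with one shared extraction that scans the rest once and cuts at the first separator character.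
import Mathlib
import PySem

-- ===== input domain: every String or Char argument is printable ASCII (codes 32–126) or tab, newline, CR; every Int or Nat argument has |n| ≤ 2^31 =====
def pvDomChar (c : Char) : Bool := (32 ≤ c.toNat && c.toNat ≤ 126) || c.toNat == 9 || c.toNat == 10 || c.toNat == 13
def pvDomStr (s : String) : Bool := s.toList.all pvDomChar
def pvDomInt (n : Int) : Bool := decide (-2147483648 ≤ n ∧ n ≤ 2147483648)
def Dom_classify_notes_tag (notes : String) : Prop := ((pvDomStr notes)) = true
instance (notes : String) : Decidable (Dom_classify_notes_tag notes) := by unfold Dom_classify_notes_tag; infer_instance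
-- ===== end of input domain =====

-- B replaces A's duplicated WARN/INFO if-chains by two priority tables and a single
-- scan-until-first-separator cut instead of two sequential split-and-strip passes (objective: alternative).

-- ===== PORT A =====
def classify_notes_tag (notes : String) : String :=
  if PySem.Str.startswith notes "ERROR:" then "ERROR"
  else if PySem.Str.startswith notes "WARN:" then
    let rest := PySem.Str.strip (PySem.Str.slice notes (some (PySem.Str.len "WARN:")) none)
    let rest := [";", "("].foldl (fun r sep =>
      if PySem.Str.isIn sep r then
        PySem.Str.strip (PySem.List.pyGetD ((PySem.Str.splitMax? r sep 1).getD []) 0 "")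
      else r) rest
    if rest = "" then "WARN" else rest
  else if PySem.Str.startswith notes "INFO:" then
    let rest := PySem.Str.strip (PySem.Str.slice notes (some (PySem.Str.len "INFO:")) none)
    let rest := [";", "("].foldl (fun r sep =>
      if PySem.Str.isIn sep r then
        PySem.Str.strip (PySem.List.pyGetD ((PySem.Str.splitMax? r sep 1).getD []) 0 "")
      else r) rest
    if rest = "" then "INFO" else rest
  else
    let low := PySem.Str.lower notes
    if PySem.Str.isIn "derived" low then "DERIVED"
    else if PySem.Str.isIn "nonofficial" low then "NONOFFICIAL"
    else if PySem.Str.isIn "no_key" low then "NO_KEY"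
    else "NA"

-- ===== PORT B =====
def pvPrefixTable : List (String × Option String) :=
  [("ERROR:", none), ("WARN:", some "WARN"), ("INFO:", some "INFO")]

def pvFallbackTable : List (String × String) :=
  [("derived", "DERIVED"), ("nonofficial", "NONOFFICIAL"), ("no_key", "NO_KEY")]

-- Source B's for/break collection loop: take chars until the first ';' or '('
-- (`c in ";("` on a one-char c is exactly c = ';' ∨ c = '(').
def pvTakeCut : List Char → List Char
  | [] => []
  | c :: rest => if c = ';' ∨ c = '(' then [] else c :: pvTakeCut rest

def classify_notes_tag_alt (notes : String) : String :=
  match pvPrefixTable.find? (fun pd => PySem.Str.startswith notes pd.1) with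
  | some (_, none) => "ERROR"
  | some (pfx, some dflt) =>
    let rest := PySem.Str.strip (PySem.Str.slice notes (some (PySem.Str.len pfx)) none)
    let rest := PySem.Str.strip (String.ofList (pvTakeCut rest.toList))
    if rest = "" then dflt else rest
  | none =>
    let low := PySem.Str.lower notes
    match pvFallbackTable.find? (fun pt => PySem.Str.isIn pt.1 low) with
    | some (_, tag) => tag
    | none => "NA"

-- ===== PRECONDITION & SPEC =====
def Spec_classify_notes_tag (notes : String) (out : String) : Prop := out = classify_notes_tag_alt notes
instance (notes : String) (out : String) : Decidable (Spec_classify_notes_tag notes out) := by unfold Spec_classify_notes_tag; infer_instance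

-- ===== CLAIM (what is proved, stated in full; the proofs are below) =====
def Claim_equal_classify_notes_tag : Prop := ∀ (notes : String), Dom_classify_notes_tag notes → Spec_classify_notes_tag notes (classify_notes_tag notes)

-- ===== LEMMAS AND PROOFS =====

theorem findgo_single_ne (c : Char) : ∀ (s : List Char) (k : Nat),
    (PySem.Chars.find.go [c] s k ≠ -1) ↔ c ∈ s := by
  intro s
  induction s with
  | nil => intro k; simp [PySem.Chars.find.go]
  | cons h t ih =>
    intro k
    rw [PySem.Chars.find.go]
    by_cases hc : [c].isPrefixOf (h :: t)
    · simp only [List.isPrefixOf, List.isPrefixOf_nil_left, Bool.and_true, beq_iff_eq] at hc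
      simp [hc, List.mem_cons]
    · simp only [List.isPrefixOf, List.isPrefixOf_nil_left, Bool.and_true, beq_iff_eq] at hc
      simp [List.isPrefixOf, hc, ih, List.mem_cons]

theorem isIn_single (c : Char) (s : List Char) :
    PySem.Chars.isIn [c] s = true ↔ c ∈ s := by
  simp [PySem.Chars.isIn, PySem.Chars.find]
  exact findgo_single_ne c s 0

theorem go_zero (sep : List Char) (fuel : Nat) (s cur : List Char) (accs : List (List Char)) :
    PySem.Chars.splitOnMax.go sep fuel 0 s cur accs = ((cur.reverse ++ s) :: accs).reverse := by
  match fuel, s with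
  | 0, s => rw [PySem.Chars.splitOnMax.go]
  | f+1, [] => rw [PySem.Chars.splitOnMax.go] <;> simp
  | f+1, c :: rest => rw [PySem.Chars.splitOnMax.go] <;> simp

theorem go_one (c : Char) : ∀ (fuel : Nat) (s cur : List Char) (accs : List (List Char)),
    s.length ≤ fuel →
    PySem.Chars.splitOnMax.go [c] fuel 1 s cur accs =
      accs.reverse ++ (if c ∈ s then
        [cur.reverse ++ s.takeWhile (· ≠ c), (s.dropWhile (· ≠ c)).tail]
      else [cur.reverse ++ s]) := by
  intro fuel
  induction fuel with
  | zero =>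
    intro s cur accs hf
    have : s = [] := List.eq_nil_of_length_eq_zero (Nat.le_zero.mp hf)
    subst this
    rw [PySem.Chars.splitOnMax.go]; simp
  | succ f ih =>
    intro s cur accs hf
    match s with
    | [] => rw [PySem.Chars.splitOnMax.go] <;> simp
    | h :: t =>
      rw [PySem.Chars.splitOnMax.go]
      · by_cases hc : h = c
        · subst hc
          have hpre : [h].isPrefixOf (h :: t) = true := by simp [List.isPrefixOf]
          simp only [hpre, if_true, Nat.succ_ne_zero, if_false, show (1:Nat) ≠ 0 by omega]
          rw [go_zero]
          simp [List.takeWhile_cons, List.dropWhile_cons]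
        · have hpre : [c].isPrefixOf (h :: t) = false := by
            simp [List.isPrefixOf]; exact fun he => absurd he.symm hc
          simp only [hpre, Bool.false_eq_true, if_false, show (1:Nat) ≠ 0 by omega]
          have hft : t.length ≤ f := by simpa using hf
          rw [ih t (h :: cur) accs hft]
          have hne : (h ≠ c) = True := by simp [hc]
          by_cases hm : c ∈ t
          · have : c ∈ h :: t := .tail _ hm
            simp [hm, this, List.takeWhile_cons, List.dropWhile_cons, hc]
          · have : c ∉ h :: t := by
              simp [List.mem_cons, hm]; intro he; exact absurd he.symm hc
            simp [hm, this, List.takeWhile_cons, hc]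

theorem pv_dropWhile_eq_self_of_prefix {p : Char → Bool} {t l : List Char}
    (hp : t <+: l) (hl : l.dropWhile p = l) : t.dropWhile p = t := by
  match t with
  | [] => simp
  | a :: t' =>
    rcases hp with ⟨r, rfl⟩
    rw [List.cons_append, List.dropWhile_cons] at hl
    rw [List.dropWhile_cons]
    split at hl
    · have h1 := congrArg List.length hl
      have h2 := List.length_dropWhile_le p (t' ++ r)
      simp at h1 h2
      omega
    · next hb => simp [hb]

theorem pv_rstrip_prefix (l : List Char) : PySem.Chars.rstrip l <+: l := by
  simp [PySem.Chars.rstrip]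
  have := List.dropWhile_suffix (l := l.reverse) PySem.Chars.isspace
  have h2 := List.reverse_prefix.mpr this
  simpa using h2

theorem pv_lstrip_strip (l : List Char) :
    (PySem.Chars.strip l).dropWhile PySem.Chars.isspace = PySem.Chars.strip l := by
  have h1 : (PySem.Chars.lstrip l).dropWhile PySem.Chars.isspace = PySem.Chars.lstrip l :=
    List.dropWhile_idempotent _ _
  exact pv_dropWhile_eq_self_of_prefix (pv_rstrip_prefix _) h1

theorem pv_rstrip_rstrip (l : List Char) :
    PySem.Chars.rstrip (PySem.Chars.rstrip l) = PySem.Chars.rstrip l := by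
  simp [PySem.Chars.rstrip, List.dropWhile_idempotent]

theorem pv_strip_eq_rstrip {l : List Char} (h : l.dropWhile PySem.Chars.isspace = l) :
    PySem.Chars.strip l = PySem.Chars.rstrip l := by
  simp [PySem.Chars.strip, PySem.Chars.lstrip, h]

theorem pv_strip_strip (l : List Char) :
    PySem.Chars.strip (PySem.Chars.strip l) = PySem.Chars.strip l := by
  rw [pv_strip_eq_rstrip (pv_lstrip_strip l)]
  simp [PySem.Chars.strip]
  exact pv_rstrip_rstrip _

theorem pv_rstrip_decomp (l : List Char) :
    l = PySem.Chars.rstrip l ++ (l.reverse.takeWhile PySem.Chars.isspace).reverse := by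
  simp only [PySem.Chars.rstrip]
  conv_lhs => rw [← l.reverse_reverse, ← List.takeWhile_append_dropWhile (p := PySem.Chars.isspace) (l := l.reverse)]
  rw [List.reverse_append]

theorem pv_mem_strip_iff {c : Char} (hc : ¬ PySem.Chars.isspace c) (l : List Char) :
    c ∈ PySem.Chars.strip l ↔ c ∈ l := by
  constructor
  · intro h
    have h2 : c ∈ PySem.Chars.lstrip l := (pv_rstrip_prefix _).mem h
    exact (List.dropWhile_suffix _).mem h2
  · intro h
    rw [← List.takeWhile_append_dropWhile (p := PySem.Chars.isspace) (l := l)] at h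
    rcases List.mem_append.mp h with h | h
    · exact absurd (List.mem_takeWhile_imp h) hc
    · -- c ∈ lstrip l
      rw [show List.dropWhile PySem.Chars.isspace l = PySem.Chars.lstrip l from rfl,
        pv_rstrip_decomp (PySem.Chars.lstrip l)] at h
      rcases List.mem_append.mp h with h | h
      · exact h
      · have := List.mem_takeWhile_imp (List.mem_reverse.mp h)
        exact absurd this hc

theorem pv_takeWhile_takeWhile {α : Type} (p q : α → Bool) (l : List α) :
    (l.takeWhile p).takeWhile q = l.takeWhile (fun x => p x && q x) := by
  induction l with
  | nil => simp
  | cons a t ih =>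
    by_cases hp : p a
    · by_cases hq : q a
      · simp [List.takeWhile_cons, hp, hq, ih]
      · simp [List.takeWhile_cons, hp, hq]
    · simp [List.takeWhile_cons, hp]

theorem pv_rstrip_append_ws {w : List Char} (hw : ∀ c ∈ w, PySem.Chars.isspace c) (x : List Char) :
    PySem.Chars.rstrip (x ++ w) = PySem.Chars.rstrip x := by
  simp only [PySem.Chars.rstrip, List.reverse_append]
  rw [List.dropWhile_append]
  have hwd : List.dropWhile PySem.Chars.isspace w.reverse = [] :=
    List.dropWhile_eq_nil_iff.mpr (by intro x hx; exact hw x (List.mem_reverse.mp hx))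
  simp [hwd]

theorem pv_strip_takeWhile_rstrip {q : Char → Bool} (hq : ∀ c, PySem.Chars.isspace c → q c)
    (t : List Char) :
    PySem.Chars.strip ((PySem.Chars.rstrip t).takeWhile q) =
      PySem.Chars.strip (t.takeWhile q) := by
  conv_rhs => rw [pv_rstrip_decomp t]
  set w := (t.reverse.takeWhile PySem.Chars.isspace).reverse with hw
  have hws : ∀ c ∈ w, PySem.Chars.isspace c := by
    intro c hcw; exact List.mem_takeWhile_imp (List.mem_reverse.mp hcw)
  rw [List.takeWhile_append]
  split
  · next hlen =>
    have hall : (PySem.Chars.rstrip t).takeWhile q = PySem.Chars.rstrip t := by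
      have := List.takeWhile_prefix (l := PySem.Chars.rstrip t) q
      exact List.IsPrefix.eq_of_length this hlen
    rw [hall]
    have hqw : w.takeWhile q = w := List.takeWhile_eq_self_iff.mpr (fun c hc => hq c (hws c hc))
    rw [hqw]
    simp only [PySem.Chars.strip]
    rw [PySem.Chars.lstrip, PySem.Chars.lstrip, List.dropWhile_append]
    split
    · next he =>
      -- rstrip t fully whitespace-dropped: both sides rstrip of dropWhile w vs ...
      simp only [List.isEmpty_iff] at he
      rw [he]
      have hwe : List.dropWhile PySem.Chars.isspace w = [] :=
        List.dropWhile_eq_nil_iff.mpr (fun x hx => hws x hx)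
      rw [hwe]
    · rw [pv_rstrip_append_ws hws]
  · rfl

theorem ws_not_semi_paren : ∀ c : Char, PySem.Chars.isspace c → (c ≠ ';' ∧ c ≠ '(') := by
  intro c h
  constructor <;> rintro rfl <;> simp [PySem.Chars.isspace] at h

-- main Chars-level cut equivalence
theorem pv_cut_eq (l : List Char) (hl : PySem.Chars.strip l = l) :
    (let l1 := if ';' ∈ l then PySem.Chars.strip (l.takeWhile (· ≠ ';')) else l;
     if '(' ∈ l1 then PySem.Chars.strip (l1.takeWhile (· ≠ '(')) else l1)
    = PySem.Chars.strip (l.takeWhile (fun x => x ≠ ';' && x ≠ '(')) := by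
  have hql : ∀ c : Char, PySem.Chars.isspace c → (c ≠ '(' : Bool) := by
    intro c h; simpa using (ws_not_semi_paren c h).2
  have hlst : l.dropWhile PySem.Chars.isspace = l := by
    conv_lhs => rw [← hl]
    rw [pv_lstrip_strip l, hl]
  by_cases hs : ';' ∈ l
  · simp only [hs, if_true]
    set t := l.takeWhile (· ≠ ';') with ht
    have htl : t.dropWhile PySem.Chars.isspace = t :=
      pv_dropWhile_eq_self_of_prefix (List.takeWhile_prefix _) hlst
    have hst : PySem.Chars.strip t = PySem.Chars.rstrip t := pv_strip_eq_rstrip htl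
    by_cases hp : '(' ∈ PySem.Chars.strip t
    · simp only [hp, if_true]
      rw [hst]
      rw [pv_strip_takeWhile_rstrip hql t]
      rw [ht, pv_takeWhile_takeWhile]
    · simp only [hp, if_false]
      have hpt : '(' ∉ t := fun hmem => hp ((pv_mem_strip_iff (by simp [PySem.Chars.isspace]) t).mpr hmem)
      have h2 : t.takeWhile (· ≠ '(') = t :=
        List.takeWhile_eq_self_iff.mpr (by intro x hx; simp; rintro rfl; exact hpt hx)
      rw [← pv_takeWhile_takeWhile, ← ht, h2]
  · simp only [hs, if_false]
    have hall : l.takeWhile (· ≠ ';') = l :=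
      List.takeWhile_eq_self_iff.mpr (by intro x hx; simp; rintro rfl; exact hs hx)
    by_cases hp : '(' ∈ l
    · simp only [hp, if_true]
      rw [← pv_takeWhile_takeWhile, hall]
    · simp only [hp, if_false]
      have : l.takeWhile (fun x => x ≠ ';' && x ≠ '(') = l :=
        List.takeWhile_eq_self_iff.mpr (by
          intro x hx; simp
          constructor
          · rintro rfl; exact hs hx
          · rintro rfl; exact hp hx)
      rw [this, hl]

theorem pv_splitOnMax_single (c : Char) (l : List Char) :
    PySem.Chars.splitOnMax l [c] 1 =
      if c ∈ l then [l.takeWhile (· ≠ c), (l.dropWhile (· ≠ c)).tail] else [l] := by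
  rw [PySem.Chars.splitOnMax]
  have h1 : ¬ ((1:Int) < 0) := by omega
  simp only [h1, if_false]
  rw [show Int.toNat 1 = 1 from rfl]
  rw [go_one c (l.length + 1) l [] [] (by omega)]
  simp

theorem pv_cutA_toList (c : Char) (sc : String) (hsc : sc.toList = [c]) (r : String) :
    ((if PySem.Str.isIn sc r then
        PySem.Str.strip (PySem.List.pyGetD ((PySem.Str.splitMax? r sc 1).getD []) 0 "")
      else r) : String).toList
    = (if c ∈ r.toList then PySem.Chars.strip (r.toList.takeWhile (· ≠ c)) else r.toList) := by
  have hIn : PySem.Str.isIn sc r = PySem.Chars.isIn [c] r.toList := by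
    rw [PySem.Str.isIn_eq, hsc]
  by_cases hm : c ∈ r.toList
  · have hb : PySem.Str.isIn sc r = true := by rw [hIn]; exact (isIn_single c _).mpr hm
    simp only [hb, if_true, hm]
    have hmap := PySem.Str.splitMax?_map r sc 1
    rw [hsc] at hmap
    cases hsp : PySem.Str.splitMax? r sc 1 with
    | none => rw [hsp] at hmap; simp [PySem.Chars.splitMax?] at hmap
    | some parts =>
      rw [hsp] at hmap
      simp only [Option.map_some, PySem.Chars.splitMax?, List.isEmpty_cons, if_false,
        Bool.false_eq_true, Option.some.injEq] at hmap
      rw [pv_splitOnMax_single, if_pos hm] at hmap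
      match parts, hmap with
      | s1 :: rest, hmap =>
        simp only [List.map_cons, List.cons.injEq] at hmap
        simp only [Option.getD_some, PySem.List.pyGetD_zero, List.getD_cons_zero,
          PySem.Str.toList_strip, hmap.1]
  · have hb : PySem.Str.isIn sc r = false := by
      rw [hIn]
      cases h : PySem.Chars.isIn [c] r.toList
      · rfl
      · exact absurd ((isIn_single c _).mp h) hm
    simp only [hb, Bool.false_eq_true, if_false, hm]

theorem pvTakeCut_eq (l : List Char) :
    pvTakeCut l = l.takeWhile (fun x => x ≠ ';' && x ≠ '(') := by
  induction l with
  | nil => simp [pvTakeCut]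
  | cons a t ih =>
    rw [pvTakeCut, List.takeWhile_cons]
    by_cases h : a = ';' ∨ a = '('
    · have hb : (a ≠ ';' && a ≠ '(') = false := by
        rcases h with rfl | rfl <;> simp
      rw [if_pos h, hb]
      simp
    · push_neg at h
      have : (a ≠ ';' && a ≠ '(') = true := by simp [h.1, h.2]
      simp [h.1, h.2, this, ih]


theorem pv_if_congr (dflt r1 r2 : String) (h : r1.toList = r2.toList) :
    (if r1 = "" then dflt else r1) = (if r2 = "" then dflt else r2) := by
  rw [String.toList_inj.mp h]

set_option maxHeartbeats 1000000 in
theorem pv_branch (s dflt : String) :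
    (let rest := PySem.Str.strip s;
     let rest := [";", "("].foldl (fun r sep =>
       if PySem.Str.isIn sep r then
         PySem.Str.strip (PySem.List.pyGetD ((PySem.Str.splitMax? r sep 1).getD []) 0 "")
       else r) rest;
     if rest = "" then dflt else rest)
    = (let rest := PySem.Str.strip s;
       let rest := PySem.Str.strip (String.ofList (pvTakeCut rest.toList));
       if rest = "" then dflt else rest) := by
  refine pv_if_congr dflt _ _ ?_
  rw [List.foldl_cons, List.foldl_cons, List.foldl_nil]
  rw [pv_cutA_toList '(' "(" rfl, pv_cutA_toList ';' ";" rfl]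
  rw [PySem.Str.toList_strip s]
  have hmain := pv_cut_eq (PySem.Chars.strip s.toList) (pv_strip_strip s.toList)
  simp only at hmain
  rw [hmain]
  rw [PySem.Str.toList_strip, String.toList_ofList, pvTakeCut_eq]

set_option maxHeartbeats 1000000 in
theorem pv_main (notes : String) : classify_notes_tag notes = classify_notes_tag_alt notes := by
  rw [classify_notes_tag, classify_notes_tag_alt]
  by_cases hE : PySem.Str.startswith notes "ERROR:"
  · simp only [pvPrefixTable, List.find?, hE, if_true]
  · by_cases hW : PySem.Str.startswith notes "WARN:"
    · simp only [pvPrefixTable, List.find?, hE, hW, Bool.false_eq_true, if_false, if_true]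
      exact pv_branch _ _
    · by_cases hI : PySem.Str.startswith notes "INFO:"
      · simp only [pvPrefixTable, List.find?, hE, hW, hI, Bool.false_eq_true, if_false, if_true]
        exact pv_branch _ _
      · simp only [pvPrefixTable, pvFallbackTable, List.find?, hE, hW, hI,
          Bool.false_eq_true, if_false]
        by_cases h1 : PySem.Str.isIn "derived" (PySem.Str.lower notes)
        · simp only [h1, if_true]
        · by_cases h2 : PySem.Str.isIn "nonofficial" (PySem.Str.lower notes)
          · simp only [h1, h2, Bool.false_eq_true, if_false, if_true]
          · by_cases h3 : PySem.Str.isIn "no_key" (PySem.Str.lower notes)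
            · simp only [h1, h2, h3, Bool.false_eq_true, if_false, if_true]
            · simp only [h1, h2, h3, Bool.false_eq_true, if_false]

-- ===== VERDICT (by name: the statement is the Claim_ definition above) =====
theorem classify_notes_tag_spec : Claim_equal_classify_notes_tag := by
  intro notes _
  unfold Spec_classify_notes_tag
  exact pv_main notes
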